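-- pv_equiv track=rewrite | github.com/echanatwell/ArxivAgent | download_validational_dataset.py | extract_related_work
-- ===== SOURCE A (Python) =====
-- def extract_related_work(text):
--     # Extract "Related Work" section
--     sections = text.split("\n")
--     related_work = []
--     capture = False
--     for line in sections:
--         if "Related Work" in line:
--             capture = True
--         elif capture and (line.strip() == "" or "References" in line):
--             break
--         if capture:
--             related_work.append(line)
--     return "\n".join(related_work)
-- ===== SOURCE B (Python) =====
-- def _is_start(line):
--     return "Related Work" in line
--
--
-- def _is_end(line):
--     return "Related Work" not in line and (line.strip() == "" or "References" in line)
--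
--
-- def extract_related_work(text):
--     lines = text.split("\n")
--     start = next((i for i, ln in enumerate(lines) if _is_start(ln)), None)
--     if start is None:
--         return ""
--     end = next((j for j in range(start + 1, len(lines)) if _is_end(lines[j])),
--                len(lines))
--     return "\n".join(lines[start:end])
-- ===== Notes on version B (the rewrite author's own statement) =====
-- stated objective: simpler
-- what changed: Replaces A's single-pass boolean state machine (capture flag, accumulator, break) by a locate-then-slice decomposition: find the first section-start line, find the first terminator line after it, and join the slice between them.
import Mathlib
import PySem

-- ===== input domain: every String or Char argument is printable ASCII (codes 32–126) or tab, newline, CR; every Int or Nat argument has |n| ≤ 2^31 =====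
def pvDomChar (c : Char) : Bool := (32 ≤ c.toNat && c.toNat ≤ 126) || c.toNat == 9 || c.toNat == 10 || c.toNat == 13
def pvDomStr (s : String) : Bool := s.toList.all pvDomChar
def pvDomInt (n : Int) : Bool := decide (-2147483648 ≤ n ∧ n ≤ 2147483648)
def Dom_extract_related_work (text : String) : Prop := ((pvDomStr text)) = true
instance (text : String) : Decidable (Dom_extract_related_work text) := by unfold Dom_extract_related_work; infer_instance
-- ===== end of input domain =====

-- B replaces A's single-pass capture/break state machine by a locate-then-slice
-- two-phase decomposition (simpler structure; same behaviour on all inputs).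

-- ===== PORT A =====
-- A's for-loop with the mutable `capture` flag, `related_work` accumulator and `break`,
-- as structural recursion over the lines (break = return the accumulator).
def pvALoop : List String → Bool → List String → List String
  | [], _, acc => acc
  | line :: rest, capture, acc =>
    if PySem.Str.isIn "Related Work" line then
      pvALoop rest true (acc ++ [line])
    else if capture && (PySem.Str.strip line == "" || PySem.Str.isIn "References" line) then
      acc  -- break
    else if capture then
      pvALoop rest capture (acc ++ [line])
    else
      pvALoop rest capture acc

def extract_related_work (text : String) : String :=
  PySem.Str.join "\n" (pvALoop ((PySem.Str.split? text "\n").getD []) false [])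

-- ===== PORT B =====
def pvIsStart (line : String) : Bool := PySem.Str.isIn "Related Work" line

def pvIsEnd (line : String) : Bool :=
  !PySem.Str.isIn "Related Work" line &&
    (PySem.Str.strip line == "" || PySem.Str.isIn "References" line)

def extract_related_work_alt (text : String) : String :=
  let lines := (PySem.Str.split? text "\n").getD []
  match lines.findIdx? pvIsStart with
  | none => ""
  | some start =>
    let stop : Nat :=
      match (lines.drop (start + 1)).findIdx? pvIsEnd with
      | none => lines.length
      | some k => start + 1 + k
    PySem.Str.join "\n" (PySem.List.slice lines (some (Int.ofNat start)) (some (Int.ofNat stop)))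

-- ===== PRECONDITION & SPEC =====
def Spec_extract_related_work (text : String) (out : String) : Prop := out = extract_related_work_alt text
instance (text : String) (out : String) : Decidable (Spec_extract_related_work text out) := by unfold Spec_extract_related_work; infer_instance

-- ===== CLAIM (what is proved, stated in full; the proofs are below) =====
def Claim_equal_extract_related_work : Prop := ∀ (text : String), Dom_extract_related_work text → Spec_extract_related_work text (extract_related_work text)

-- ===== LEMMAS AND PROOFS =====

-- a 'Related Work' line is never a terminator
theorem pvStart_not_end {l : String} (h : pvIsStart l = true) : pvIsEnd l = false := by
  show (!pvIsStart l && (PySem.Str.strip l == "" || PySem.Str.isIn "References" l)) = false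
  rw [h]; rfl

-- on a non-'Related Work' line, A's break condition is exactly pvIsEnd
theorem pvEnd_eq {l : String} (h : pvIsStart l = false) :
    (PySem.Str.strip l == "" || PySem.Str.isIn "References" l) = pvIsEnd l := by
  show _ = (!pvIsStart l && (PySem.Str.strip l == "" || PySem.Str.isIn "References" l))
  rw [h]; rfl

-- controlled one-step unfoldings of A's loop
theorem pvALoop_cons_start (l : String) (rest acc : List String) (c : Bool)
    (h : pvIsStart l = true) :
    pvALoop (l :: rest) c acc = pvALoop rest true (acc ++ [l]) := by
  have h' : PySem.Str.isIn "Related Work" l = true := h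
  simp only [pvALoop, if_pos h']

theorem pvALoop_cons_break (l : String) (rest acc : List String)
    (h : pvIsStart l = false) (h2 : pvIsEnd l = true) :
    pvALoop (l :: rest) true acc = acc := by
  have h' : PySem.Str.isIn "Related Work" l = false := h
  have h2' : (true && (PySem.Str.strip l == "" || PySem.Str.isIn "References" l)) = true := by
    rw [Bool.true_and, pvEnd_eq h, h2]
  simp only [pvALoop, h', Bool.false_eq_true, if_false, if_pos h2']

theorem pvALoop_cons_keep (l : String) (rest acc : List String)
    (h : pvIsStart l = false) (h2 : pvIsEnd l = false) :
    pvALoop (l :: rest) true acc = pvALoop rest true (acc ++ [l]) := by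
  have h' : PySem.Str.isIn "Related Work" l = false := h
  have h2' : (true && (PySem.Str.strip l == "" || PySem.Str.isIn "References" l)) = false := by
    rw [Bool.true_and, pvEnd_eq h, h2]
  simp only [pvALoop, h', h2', Bool.false_eq_true, if_false]
  rw [if_pos trivial]

theorem pvALoop_cons_skip (l : String) (rest acc : List String)
    (h : pvIsStart l = false) :
    pvALoop (l :: rest) false acc = pvALoop rest false acc := by
  have h' : PySem.Str.isIn "Related Work" l = false := h
  simp only [pvALoop, h', Bool.false_and, Bool.false_eq_true, if_false]

-- In capture mode, A keeps exactly the lines up to (excluding) the first pvIsEnd line.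
theorem pvALoop_capture (lines : List String) (acc : List String) :
    pvALoop lines true acc = acc ++ lines.takeWhile (fun l => !pvIsEnd l) := by
  induction lines generalizing acc with
  | nil => simp [pvALoop]
  | cons l rest ih =>
    by_cases h : pvIsStart l = true
    · rw [pvALoop_cons_start l rest acc true h, ih,
        List.takeWhile_cons, pvStart_not_end h]
      simp
    · rw [Bool.not_eq_true] at h
      by_cases h2 : pvIsEnd l = true
      · rw [pvALoop_cons_break l rest acc h h2, List.takeWhile_cons, h2]
        simp
      · rw [Bool.not_eq_true] at h2
        rw [pvALoop_cons_keep l rest acc h h2, ih, List.takeWhile_cons, h2]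
        simp
-- Before the first 'Related Work' line A keeps nothing; from it on it is in capture mode.
theorem pvALoop_start (lines : List String) (acc : List String) :
    pvALoop lines false acc =
      acc ++ (match lines.findIdx? pvIsStart with
              | none => []
              | some i => (lines.drop i).takeWhile (fun l => !pvIsEnd l)) := by
  induction lines generalizing acc with
  | nil => simp [pvALoop]
  | cons l rest ih =>
    by_cases h : pvIsStart l = true
    · rw [pvALoop_cons_start l rest acc false h, pvALoop_capture]
      simp only [List.findIdx?_cons, h, if_pos rfl, List.drop_zero]
      simp [List.takeWhile_cons, pvStart_not_end h]
    · rw [Bool.not_eq_true] at h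
      rw [pvALoop_cons_skip l rest acc h, ih]
      simp only [List.findIdx?_cons, h, Bool.false_eq_true, if_false]
      cases hf : rest.findIdx? pvIsStart with
      | none => simp
      | some i => simp

-- take up to the first index satisfying pvIsEnd (or everything) = takeWhile (!pvIsEnd).
theorem pvTake_findIdx (lines : List String) :
    lines.take (match lines.findIdx? pvIsEnd with
                | none => lines.length
                | some k => k) = lines.takeWhile (fun l => !pvIsEnd l) := by
  induction lines with
  | nil => simp
  | cons l rest ih =>
    by_cases h : pvIsEnd l = true
    · simp [List.findIdx?_cons, h, List.takeWhile_cons]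
    · rw [Bool.not_eq_true] at h
      cases hf : rest.findIdx? pvIsEnd with
      | none =>
        rw [hf] at ih
        simp only [List.take_length] at ih
        simp [List.findIdx?_cons, h, hf, List.takeWhile_cons, ← ih]
      | some k =>
        rw [hf] at ih
        simp [List.findIdx?_cons, h, hf, List.takeWhile_cons, List.take_succ_cons, ih]

-- A's loop result equals B's slice, at the list level.
theorem pv_main (lines : List String) :
    pvALoop lines false [] =
      (match lines.findIdx? pvIsStart with
       | none => []
       | some start =>
         PySem.List.slice lines (some (Int.ofNat start))
           (some (Int.ofNat (match (lines.drop (start + 1)).findIdx? pvIsEnd with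
                             | none => lines.length
                             | some k => start + 1 + k)))) := by
  rw [pvALoop_start, List.nil_append]
  cases hf : lines.findIdx? pvIsStart with
  | none => simp
  | some start =>
    obtain ⟨hlt, hp, -⟩ := List.findIdx?_eq_some_iff_getElem.mp hf
    have hne : pvIsEnd (lines[start]) = false := pvStart_not_end hp
    have hdrop : lines.drop start = lines[start] :: lines.drop (start + 1) :=
      List.drop_eq_getElem_cons hlt
    have hTW := pvTake_findIdx (lines.drop (start + 1))
    simp only [Int.ofNat_eq_natCast, PySem.List.slice_natCast]
    cases hk : (lines.drop (start + 1)).findIdx? pvIsEnd with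
    | none =>
      rw [hk] at hTW
      simp only [List.take_length] at hTW
      have hlen : lines.length - start = (lines.drop (start + 1)).length + 1 := by
        simp only [List.length_drop]; omega
      rw [hlen, hdrop, List.take_succ_cons, List.takeWhile_cons, hne,
        List.take_of_length_le (le_refl _), ← hTW]
      simp
    | some k =>
      rw [hk] at hTW
      have hlen : start + 1 + k - start = k + 1 := by omega
      rw [hlen, hdrop, List.take_succ_cons, List.takeWhile_cons, hne, hTW]
      simp

-- ===== VERDICT (by name: the statement is the Claim_ definition above) =====
theorem extract_related_work_spec : Claim_equal_extract_related_work := by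
  intro text _
  unfold Spec_extract_related_work extract_related_work extract_related_work_alt
  rw [pv_main]
  cases h : ((PySem.Str.split? text "\n").getD []).findIdx? pvIsStart with
  | none => simp only [h]; rfl
  | some i => simp only [h]
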